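-- pv_equiv track=rewrite | github.com/pypi-data/pypi-mirror-73 | packages/beginnerpy/BeginnerPy-0.1.2.tar.gz/BeginnerPy-0.1.2/beginnerpy/challenges/daily/c28_potions.py | apply_potions
-- ===== SOURCE A (Python) =====
-- def apply_potions(potions: str) -> str:
--     digits = ""
--     effects = {
--         "A": 1,
--         "B": -1
--     }
--     output = []
--     for c in potions:
--         if c.isdigit():
--             digits += c
--         elif c in effects:
--             output.append(int(digits) + effects[c])
--             digits = ""
--     if digits:
--         output.append(int(digits))
--     return "".join(map(str, output))
-- ===== SOURCE B (Python) =====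
-- def apply_potions(potions: str) -> str:
--     # Keep only the meaningful characters, then walk the filtered text run by run:
--     # a maximal digit run followed by an effect letter becomes int(run) +/- 1;
--     # a trailing digit run (no effect after it) is kept as-is.
--     keep = [c for c in potions if c.isdigit() or c == "A" or c == "B"]
--     pieces = []
--     i, n = 0, len(keep)
--     while i < n:
--         j = i
--         while j < n and keep[j].isdigit():
--             j += 1
--         run = "".join(keep[i:j])
--         if j < n:  # keep[j] is 'A' or 'B'
--             pieces.append(str(int(run) + (1 if keep[j] == "A" else -1)))
--             i = j + 1
--         else:
--             if run:
--                 pieces.append(str(int(run)))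
--             i = j
--     return "".join(pieces)
-- ===== Notes on version B (the rewrite author's own statement) =====
-- stated objective: alternative
-- what changed: B first filters the string to digits and effect letters, then walks it run-by-run (maximal digit run + following effect) with a two-pointer scan, instead of A's char-by-char accumulator that carries a pending digits string and an output list of ints.
import Mathlib
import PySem

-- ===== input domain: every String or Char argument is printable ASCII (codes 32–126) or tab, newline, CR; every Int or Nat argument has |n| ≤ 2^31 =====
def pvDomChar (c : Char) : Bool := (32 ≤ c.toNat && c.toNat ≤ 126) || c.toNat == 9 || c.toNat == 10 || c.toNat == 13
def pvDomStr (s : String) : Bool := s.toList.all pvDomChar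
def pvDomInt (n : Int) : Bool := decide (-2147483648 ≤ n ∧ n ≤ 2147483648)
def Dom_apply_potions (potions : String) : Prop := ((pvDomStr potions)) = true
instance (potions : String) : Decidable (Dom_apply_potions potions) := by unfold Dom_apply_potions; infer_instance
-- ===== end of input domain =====

-- B re-implements A by filtering the string and then walking it digit-run by digit-run
-- (two-pointer scan) instead of A's char-by-char accumulator; same cost, alternative structure.

-- int(ds) for a digit string; the ValueError case (ds = "" before an effect letter) is excluded by Pre_.
def pyInt (ds : List Char) : Int := (PySem.Int.ofStr? (String.mk ds)).getD 0

-- ===== PORT A =====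
def effectsD : PySem.Dict Char Int := PySem.Dict.ofList [('A', 1), ('B', -1)]

-- one iteration of A's for-loop over state (digits, output)
def apAStep (st : List Char × List Int) (c : Char) : List Char × List Int :=
  if PySem.Chars.isdigit c then (st.1 ++ [c], st.2)
  else if (effectsD.get? c).isSome then ([], st.2 ++ [pyInt st.1 + (effectsD.get? c).getD 0])
  else st

def apply_potions (potions : String) : String :=
  let st := potions.toList.foldl apAStep ([], [])
  let output := if st.1.isEmpty then st.2 else st.2 ++ [pyInt st.1]
  PySem.Str.join "" (output.map PySem.Int.toStr)

-- ===== PORT B =====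
def keepChar (c : Char) : Bool := PySem.Chars.isdigit c || c == 'A' || c == 'B'

-- one digit run + the effect letter after it per step (B's outer while loop; takeWhile/dropWhile = the inner j scan)
def apBRun (l : List Char) : List String :=
  match h : l.dropWhile PySem.Chars.isdigit with
  | [] =>
      let run := l.takeWhile PySem.Chars.isdigit
      if run.isEmpty then [] else [PySem.Int.toStr (pyInt run)]
  | e :: rest' =>
      PySem.Int.toStr (pyInt (l.takeWhile PySem.Chars.isdigit) + (if e == 'A' then 1 else -1))
        :: apBRun rest'
termination_by l.length
decreasing_by
  have h1 : (l.dropWhile PySem.Chars.isdigit).length ≤ l.length := l.length_dropWhile_le _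
  rw [h] at h1; simp at h1; omega

def apply_potions_alt (potions : String) : String :=
  PySem.Str.join "" (apBRun (potions.toList.filter keepChar))

-- ===== PRECONDITION & SPEC =====
def effectChar (c : Char) : Bool := c == 'A' || c == 'B'

-- Pre_ excludes exactly the inputs where A raises ValueError — int("") because an 'A'/'B'
-- occurs with no digit since the previous effect letter (or the start); B raises there too.
def Pre_apply_potions (potions : String) : Prop :=
  ((potions.toList.filter keepChar).head?.all (fun c => !effectChar c)) = true ∧
  List.IsChain (fun a b => effectChar b = true → PySem.Chars.isdigit a = true)
    (potions.toList.filter keepChar)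
instance (potions : String) : Decidable (Pre_apply_potions potions) := by
  unfold Pre_apply_potions; infer_instance

def pvWitness_apply_potions : String := "1A2"

def Spec_apply_potions (potions : String) (out : String) : Prop := out = apply_potions_alt potions
instance (potions : String) (out : String) : Decidable (Spec_apply_potions potions out) := by unfold Spec_apply_potions; infer_instance

-- ===== CLAIM (what is proved, stated in full; the proofs are below) =====
def Claim_equal_apply_potions : Prop := ∀ (potions : String), Dom_apply_potions potions → Pre_apply_potions potions → Spec_apply_potions potions (apply_potions potions)

-- ===== LEMMAS AND PROOFS =====

lemma effGet (c : Char) :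
    effectsD.get? c = if c == 'A' then some 1 else if c == 'B' then some (-1) else none := by
  have h : effectsD = PySem.Dict.mk [('A',1),('B',-1)] := by decide
  rw [h]
  by_cases h1 : c = 'A' <;> by_cases h2 : c = 'B' <;>
    simp_all [PySem.Dict.get?, List.find?] <;>
    rw [show ('A' == c) = false by simp [Ne.symm h1], show ('B' == c) = false by simp [Ne.symm h2]]

lemma eff_not_digit {c : Char} (h : effectChar c = true) : PySem.Chars.isdigit c = false := by
  simp [effectChar] at h
  rcases h with h | h <;> subst h <;> decide

-- A's loop skips every character B's filter drops
lemma filter_fold (l : List Char) (st : List Char × List Int) :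
    l.foldl apAStep st = (l.filter keepChar).foldl apAStep st := by
  induction l generalizing st with
  | nil => rfl
  | cons c t ih =>
    by_cases hk : keepChar c = true
    · simp [hk, List.foldl_cons, ih]
    · have hstep : apAStep st c = st := by
        simp [keepChar] at hk
        obtain ⟨⟨hk1, hk2⟩, hk3⟩ := hk
        simp [apAStep, hk1, effGet, hk2, hk3]
      simp [hk, List.foldl_cons, hstep, ih]

-- the span of a digit prefix followed by a non-digit
lemma span_digits {ds : List Char} (c : Char) (t : List Char)
    (hds : ∀ x ∈ ds, PySem.Chars.isdigit x = true) (hc : PySem.Chars.isdigit c = false) :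
    (ds ++ c :: t).takeWhile PySem.Chars.isdigit = ds ∧
    (ds ++ c :: t).dropWhile PySem.Chars.isdigit = c :: t := by
  induction ds with
  | nil => simp [hc]
  | cons d ds' ih =>
    have hd : PySem.Chars.isdigit d = true := hds d (by simp)
    have := ih (fun x hx => hds x (by simp [hx]))
    simp [hd, this]

def finalize (st : List Char × List Int) : List String :=
  (if st.1.isEmpty then st.2 else st.2 ++ [pyInt st.1]).map PySem.Int.toStr

-- main invariant: A's loop from state (ds, out) on the remaining filtered text l
-- produces what B produces on ds ++ l, prefixed by the already-emitted output
lemma main_inv (l : List Char) : ∀ (ds : List Char) (out : List Int),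
    (∀ x ∈ ds, PySem.Chars.isdigit x = true) →
    (∀ c ∈ l, keepChar c = true) →
    (∀ c ∈ (ds ++ l).head?, effectChar c = false) →
    List.IsChain (fun a b => effectChar b = true → PySem.Chars.isdigit a = true) (ds ++ l) →
    finalize (l.foldl apAStep (ds, out)) = out.map PySem.Int.toStr ++ apBRun (ds ++ l) := by
  induction l with
  | nil =>
    intro ds out hds _ _ _
    have htake : ds.takeWhile PySem.Chars.isdigit = ds := List.takeWhile_eq_self_iff.mpr hds
    have hdrop : ds.dropWhile PySem.Chars.isdigit = [] := List.dropWhile_eq_nil_iff.mpr hds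
    rw [List.append_nil, List.foldl_nil, apBRun]
    split
    · simp only [htake, finalize]
      by_cases h : ds.isEmpty <;> simp [h]
    · next e rest' heq => rw [hdrop] at heq; exact absurd heq (by simp)
  | cons c t ih =>
    intro ds out hds hl hhead hchain
    have hkc : keepChar c = true := hl c (by simp)
    simp only [List.foldl_cons]
    by_cases hdig : PySem.Chars.isdigit c = true
    · -- digit: extend the run
      have hstep : apAStep (ds, out) c = (ds ++ [c], out) := by simp [apAStep, hdig]
      rw [hstep, show ds ++ c :: t = (ds ++ [c]) ++ t by simp]
      refine ih (ds ++ [c]) out ?_ (fun x hx => hl x (by simp [hx])) ?_ ?_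
      · intro x hx; rcases List.mem_append.mp hx with h | h
        · exact hds x h
        · simp at h; subst h; exact hdig
      · intro x hx
        rcases ds with _ | ⟨d, ds'⟩
        · simp at hx; subst hx
          by_cases he : effectChar c = true
          · rw [eff_not_digit he] at hdig; exact absurd hdig (by simp)
          · simpa using he
        · exact hhead x (by simpa using hx)
      · simpa using hchain
    · -- effect letter
      have heff : effectChar c = true := by
        simp [keepChar, hdig] at hkc; simp [effectChar]
        rcases hkc with h | h <;> simp [h]
      have hdsne : ds ≠ [] := by
        rintro rfl
        have := hhead c (by simp)
        rw [heff] at this; exact absurd this (by simp)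
      have hspan := span_digits c t hds (by simpa using hdig)
      have hstep : apAStep (ds, out) c
          = ([], out ++ [pyInt ds + (if c == 'A' then 1 else -1)]) := by
        simp only [apAStep, hdig, Bool.false_eq_true, if_false, effGet]
        simp [effectChar] at heff
        rcases heff with h | h <;> simp [h]
      rw [hstep]
      have hBrun : apBRun (ds ++ c :: t)
          = PySem.Int.toStr (pyInt ds + (if c == 'A' then 1 else -1)) :: apBRun t := by
        rw [apBRun]
        split
        · next heq => rw [hspan.2] at heq; exact absurd heq (by simp)
        · next e rest' heq =>
            rw [hspan.2] at heq
            injection heq with h1 h2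
            subst h1; subst h2
            rw [hspan.1]
      rw [hBrun]
      have hchain' : List.IsChain (fun a b => effectChar b = true → PySem.Chars.isdigit a = true) (c :: t) :=
        (List.isChain_append.mp hchain).2.1
      have hht : ∀ x ∈ ([] ++ t : List Char).head?, effectChar x = false := by
        intro x hx
        rcases t with _ | ⟨y, t'⟩
        · simp at hx
        · simp at hx; subst hx
          have hR := (List.isChain_cons_cons.mp hchain').1
          by_cases hy : effectChar y = true
          · exact absurd (hR hy) (by simp [eff_not_digit heff])
          · simpa using hy
      have := ih [] (out ++ [pyInt ds + (if c == 'A' then 1 else -1)])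
        (by intro x hx; simp at hx) (fun x hx => hl x (by simp [hx])) hht
        (by simpa using hchain'.tail)
      simp only [List.nil_append] at this
      rw [this]
      simp

theorem apply_potions_spec : Claim_equal_apply_potions := by
  intro potions _ hpre
  show PySem.Str.join "" (finalize (potions.toList.foldl apAStep ([], [])))
      = PySem.Str.join "" (apBRun (potions.toList.filter keepChar))
  rw [filter_fold]
  have h := main_inv (potions.toList.filter keepChar) [] []
    (by intro x hx; simp at hx)
    (by intro c hc; exact (List.mem_filter.mp hc).2)
    (by
      intro c hc
      have h1 := hpre.1
      rw [Option.all_eq_true] at h1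
      simpa using h1 c hc)
    (by simpa using hpre.2)
  simp only [List.nil_append, List.map_nil] at h
  rw [h]
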